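-- pv_equiv track=rewrite | github.com/jingfelix/Scripts | action_bee.py | removeBlank
-- ===== SOURCE A (Python) =====
-- def removeBlank(text: str) -> str:
--     text = text.strip()
--     text_list:list = []
--     alphabet = "abcdefghijklmnopqrstuvwxyz ,:;-_"
--     alphabet = alphabet + alphabet.upper()
--     markers = ".!?"
--     for i in range(len(text)):
--         condition_1:bool = (text[i] == "\n")
--         condition_2:bool = (text[i-1] in alphabet) and i+1 < len(text) and (text[i+1] in alphabet)
--         condition_3:bool = text[i-1] in markers
--         if condition_1 and condition_2 and not condition_3:
--             text_list.append("")
--         else: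
--             text_list.append(text[i])
--
--     return "".join(text_list)
-- ===== SOURCE B (Python) =====
-- def removeBlank(text: str) -> str:
--     GLUE = "abcdefghijklmnopqrstuvwxyzABCDEFGHIJKLMNOPQRSTUVWXYZ ,:;-_"
--     parts = text.strip().split("\n")
--     res = parts[0]
--     for part in parts[1:]:
--         if res and part and res[-1] in GLUE and part[0] in GLUE:
--             res += part
--         else:
--             res += "\n" + part
--     return res
-- ===== Notes on version B (the rewrite author's own statement) =====
-- stated objective: faster
-- what changed: Replaced A's index loop over every character (with its wrap-around text[i-1] read, dead punctuation-markers test and per-index list append) by a staged split-then-rejoin: split the stripped text on newlines once and fold over the parts, gluing two adjacent parts together exactly when the boundary characters are both in the glue alphabet, else re-inserting the newline.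
import Mathlib
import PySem

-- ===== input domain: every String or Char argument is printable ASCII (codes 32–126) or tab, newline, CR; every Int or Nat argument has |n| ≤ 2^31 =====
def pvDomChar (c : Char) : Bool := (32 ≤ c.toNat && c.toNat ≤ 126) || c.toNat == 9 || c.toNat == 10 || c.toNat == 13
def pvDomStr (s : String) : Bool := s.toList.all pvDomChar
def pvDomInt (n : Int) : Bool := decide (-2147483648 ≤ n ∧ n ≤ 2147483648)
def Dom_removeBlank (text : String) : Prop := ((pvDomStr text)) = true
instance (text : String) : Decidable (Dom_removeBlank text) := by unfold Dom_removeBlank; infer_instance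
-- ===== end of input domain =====

-- B replaces A's per-character index loop (with its wrap-around text[i-1] read, dead markers test
-- and per-index list append) by a staged split-on-newline / conditional-rejoin fold over the parts;
-- same return value (objective: faster, measurably so in a timing run).

-- ===== PORT A =====
def removeBlank (text : String) : String :=
  let t := PySem.Chars.strip text.toList
  let alphabet0 := "abcdefghijklmnopqrstuvwxyz ,:;-_".toList
  let alphabet := alphabet0 ++ PySem.Chars.upper alphabet0
  let markers := ".!?".toList
  let text_list : List (List Char) :=
    (PySem.List.pyRange 0 (PySem.Chars.len t)).foldl (fun acc i =>
      let condition_1 : Bool := PySem.List.pyGet? t i == some '\n'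
      let condition_2 : Bool :=
        ((PySem.List.pyGet? t (i - 1)).map alphabet.contains).getD false
          && decide (i + 1 < PySem.Chars.len t)
          && ((PySem.List.pyGet? t (i + 1)).map alphabet.contains).getD false
      let condition_3 : Bool := ((PySem.List.pyGet? t (i - 1)).map markers.contains).getD false
      if condition_1 && condition_2 && !condition_3 then acc ++ [([] : List Char)]
      else acc ++ [(PySem.List.pyGet? t i).toList]) []
  String.mk text_list.flatten

-- ===== PORT B =====
def removeBlank_alt (text : String) : String :=
  let GLUE := "abcdefghijklmnopqrstuvwxyzABCDEFGHIJKLMNOPQRSTUVWXYZ ,:;-_".toList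
  let parts := PySem.Chars.splitOn (PySem.Chars.strip text.toList) ['\n']
  -- parts[0]: str.split always returns at least one part, so the index is in range
  let res0 := (PySem.List.pyGet? parts 0).getD []
  let res :=
    (PySem.List.slice parts (some 1) none).foldl (fun res part =>
      if !res.isEmpty && !part.isEmpty
          && ((PySem.List.pyGet? res (-1)).map GLUE.contains).getD false
          && ((PySem.List.pyGet? part 0).map GLUE.contains).getD false
      then res ++ part
      else res ++ '\n' :: part) res0
  String.mk res

-- ===== PRECONDITION & SPEC =====
def Spec_removeBlank (text : String) (out : String) : Prop := out = removeBlank_alt text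
instance (text : String) (out : String) : Decidable (Spec_removeBlank text out) := by unfold Spec_removeBlank; infer_instance

-- ===== CLAIM (what is proved, stated in full; the proofs are below) =====
def Claim_equal_removeBlank : Prop := ∀ (text : String), Dom_removeBlank text → Spec_removeBlank text (removeBlank text)

-- ===== LEMMAS AND PROOFS =====

def pvAlpha : List Char :=
  "abcdefghijklmnopqrstuvwxyz ,:;-_".toList
    ++ PySem.Chars.upper "abcdefghijklmnopqrstuvwxyz ,:;-_".toList

def pvMarkers : List Char := ".!?".toList

def pvGlue : List Char :=
  "abcdefghijklmnopqrstuvwxyzABCDEFGHIJKLMNOPQRSTUVWXYZ ,:;-_".toList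

-- A's per-index output piece
def pvGA (t : List Char) (i : Int) : List Char :=
  let condition_1 : Bool := PySem.List.pyGet? t i == some '\n'
  let condition_2 : Bool :=
    ((PySem.List.pyGet? t (i - 1)).map pvAlpha.contains).getD false
      && decide (i + 1 < PySem.Chars.len t)
      && ((PySem.List.pyGet? t (i + 1)).map pvAlpha.contains).getD false
  let condition_3 : Bool := ((PySem.List.pyGet? t (i - 1)).map pvMarkers.contains).getD false
  if condition_1 && condition_2 && !condition_3 then [] else (PySem.List.pyGet? t i).toList

-- common reference recursion: sliding window with the carried previous character
def pvCore : Option Char → List Char → List Char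
  | _, [] => []
  | _, [c] => [c]
  | p, c :: n :: t =>
      (if c == '\n' && ((p.map pvGlue.contains).getD false) && pvGlue.contains n
       then [] else [c]) ++ pvCore (some c) (n :: t)

def pvGlueO (p : Option Char) : Bool := (p.map pvGlue.contains).getD false

-- B's rejoin fold, structurally
def pvFoldB (res : List Char) : List (List Char) → List Char
  | [] => res
  | u :: ps =>
      pvFoldB (if pvGlueO res.getLast? && pvGlueO u.head? then res ++ u else res ++ '\n' :: u) ps

-- split on '\n', structurally (pre = reversed-free current prefix)
def pvSp (pre : List Char) : List Char → List (List Char)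
  | [] => [pre]
  | c :: rest => if c = '\n' then pre :: pvSp [] rest else pvSp (pre ++ [c]) rest

-- '\n'-join with a leading '\n'
def pvIcatPre : List (List Char) → List Char
  | [] => []
  | u :: rest => '\n' :: (u ++ pvIcatPre rest)

set_option maxRecDepth 10000 in
lemma pv_all1 : pvAlpha.all (fun y => pvGlue.contains y) = true := by rfl

set_option maxRecDepth 10000 in
lemma pv_all2 : pvGlue.all (fun y => pvAlpha.contains y) = true := by rfl

set_option maxRecDepth 10000 in
lemma pv_all3 : pvMarkers.all (fun y => !pvAlpha.contains y) = true := by rfl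

lemma pv_contains_eq (x : Char) : pvAlpha.contains x = pvGlue.contains x := by
  by_cases hx : x ∈ pvAlpha
  · rw [List.contains_iff_mem.mpr hx, (List.all_eq_true.mp pv_all1) x hx]
  · have h1 : pvAlpha.contains x = false := by
      cases hv : pvAlpha.contains x
      · rfl
      · exact absurd (List.contains_iff_mem.mp hv) hx
    have h2 : pvGlue.contains x = false := by
      cases hv : pvGlue.contains x
      · rfl
      · have hm := List.contains_iff_mem.mp hv
        exact absurd (List.contains_iff_mem.mp ((List.all_eq_true.mp pv_all2) x hm)) hx
    rw [h1, h2]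

lemma pv_alpha_not_marker (x : Char) (h : pvAlpha.contains x = true) :
    pvMarkers.contains x = false := by
  cases hv : pvMarkers.contains x
  · rfl
  · have hm := List.contains_iff_mem.mp hv
    have h3 := (List.all_eq_true.mp pv_all3) x hm
    rw [h] at h3
    exact absurd h3 (by decide)

lemma pv_cond_eq (a c b : Char) :
    (((c == '\n') && (pvAlpha.contains a && pvAlpha.contains b)) && !(pvMarkers.contains a))
      = ((c == '\n') && pvGlue.contains a && pvGlue.contains b) := by
  rw [← pv_contains_eq a, ← pv_contains_eq b]
  by_cases ha : pvAlpha.contains a = true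
  · rw [ha, pv_alpha_not_marker a ha]
    cases c == '\n' <;> cases pvAlpha.contains b <;> rfl
  · have ha' : pvAlpha.contains a = false := by
      cases hv : pvAlpha.contains a
      · rfl
      · exact absurd hv ha
    rw [ha']
    cases c == '\n' <;> cases pvAlpha.contains b <;> rfl

lemma pv_strip_head (l : List Char) (c : Char)
    (h : (PySem.Chars.strip l).head? = some c) : PySem.Chars.isspace c = false := by
  have hstrip : PySem.Chars.strip l
      = List.rdropWhile PySem.Chars.isspace (PySem.Chars.lstrip l) := by
    simp [PySem.Chars.strip, PySem.Chars.rstrip, List.rdropWhile]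
  rw [hstrip] at h
  obtain ⟨tl, htl⟩ := List.rdropWhile_prefix PySem.Chars.isspace (PySem.Chars.lstrip l)
  have hm : (PySem.Chars.lstrip l).head? = some c := by
    rw [← htl]
    rcases hd : List.rdropWhile PySem.Chars.isspace (PySem.Chars.lstrip l) with _ | ⟨a, as⟩
    · rw [hd] at h; simp at h
    · rw [hd] at h; simp at h; simp [h]
  have hf : List.find? (fun x => !PySem.Chars.isspace x) l = some c := by
    rw [List.find?_not_eq_head?_dropWhile]
    exact hm
  have := List.find?_some hf
  simpa using this

lemma pv_A_unfold (text : String) :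
    removeBlank text
      = String.mk ((PySem.List.pyRange 0 (PySem.Chars.len (PySem.Chars.strip text.toList))).flatMap
          (pvGA (PySem.Chars.strip text.toList))) := by
  simp only [removeBlank]
  rw [show (fun (acc : List (List Char)) (i : Int) =>
        let condition_1 : Bool := PySem.List.pyGet? (PySem.Chars.strip text.toList) i == some '\n'
        let condition_2 : Bool :=
          ((PySem.List.pyGet? (PySem.Chars.strip text.toList) (i - 1)).map ("abcdefghijklmnopqrstuvwxyz ,:;-_".toList ++ PySem.Chars.upper "abcdefghijklmnopqrstuvwxyz ,:;-_".toList).contains).getD false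
            && decide (i + 1 < PySem.Chars.len (PySem.Chars.strip text.toList))
            && ((PySem.List.pyGet? (PySem.Chars.strip text.toList) (i + 1)).map ("abcdefghijklmnopqrstuvwxyz ,:;-_".toList ++ PySem.Chars.upper "abcdefghijklmnopqrstuvwxyz ,:;-_".toList).contains).getD false
        let condition_3 : Bool := ((PySem.List.pyGet? (PySem.Chars.strip text.toList) (i - 1)).map (".!?".toList).contains).getD false
        if condition_1 && condition_2 && !condition_3 then acc ++ [([] : List Char)]
        else acc ++ [(PySem.List.pyGet? (PySem.Chars.strip text.toList) i).toList])
      = (fun acc i => acc ++ [pvGA (PySem.Chars.strip text.toList) i]) from by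
    funext acc i
    simp only [pvGA, pvAlpha, pvMarkers]
    split <;> rfl]
  rw [PySem.List.foldl_append_singleton_eq_map]
  simp [List.flatMap_def]

lemma pv_A_tail (t : List Char) :
    ∀ (k i : Nat), t.length - i ≤ k → 1 ≤ i →
      (PySem.List.pyRange (i : Int) (t.length : Int)).flatMap (pvGA t)
        = pvCore t[i-1]? (t.drop i) := by
  intro k
  induction k with
  | zero =>
      intro i hk _
      have hge : t.length ≤ i := by omega
      rw [PySem.List.pyRange_one_eq_nil (by exact_mod_cast hge)]
      rw [List.drop_eq_nil_of_le hge]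
      rfl
  | succ k ih =>
      intro i hk hi
      by_cases hlt : i < t.length
      · have hcast : ((i : Int)) < (t.length : Int) := by exact_mod_cast hlt
        rw [PySem.List.pyRange_one_cons hcast]
        rw [List.flatMap_cons]
        have hstep : ((i : Int) + 1) = ((i + 1 : Nat) : Int) := by push_cast; ring
        rw [hstep, ih (i+1) (by omega) (by omega)]
        have hi1 : ((i : Int) - 1) = ((i - 1 : Nat) : Int) := by omega
        have hgi : PySem.List.pyGet? t (i : Int) = some (t[i]'hlt) := by
          rw [PySem.List.pyGet?_natCast]; simp [List.getElem?_eq_getElem hlt]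
        have him1 : i - 1 < t.length := by omega
        have hgm : PySem.List.pyGet? t ((i : Int) - 1) = some (t[i-1]'him1) := by
          rw [hi1, PySem.List.pyGet?_natCast]; simp [List.getElem?_eq_getElem him1]
        have hdrop : t.drop i = t[i]'hlt :: t.drop (i+1) := List.drop_eq_getElem_cons hlt
        by_cases hnext : i + 1 < t.length
        · have hgn : PySem.List.pyGet? t ((i : Int) + 1) = some (t[i+1]'hnext) := by
            rw [hstep, PySem.List.pyGet?_natCast]; simp [List.getElem?_eq_getElem hnext]
          have hdrop2 : t.drop (i+1) = t[i+1]'hnext :: t.drop (i+2) := List.drop_eq_getElem_cons hnext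
          rw [hdrop, hdrop2]
          have hidx : t[(i+1)-1]? = some (t[i]'hlt) := by
            simp [List.getElem?_eq_getElem hlt]
          rw [hidx]
          rw [pvCore]
          congr 1
          · have hc2 : ((i:Int) + 1 < (t.length:Int)) := by exact_mod_cast hnext
            simp only [pvGA, hgi, hgn, hgm, PySem.Chars.len_eq, Option.map_some,
              Option.getD_some, hc2, decide_true, Bool.and_true,
              List.getElem?_eq_getElem him1, Option.some_beq_some]
            rw [pv_cond_eq]
            rfl
        · have hdropnil : t.drop (i+1) = [] := List.drop_eq_nil_of_le (by omega)
          rw [hdrop, hdropnil]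
          have hganow : pvGA t (i : Int) = [t[i]'hlt] := by
            simp only [pvGA, hgi, PySem.Chars.len_eq]
            have hc2 : ¬ ((i:Int) + 1 < (t.length:Int)) := by
              have : t.length ≤ i + 1 := by omega
              exact_mod_cast not_lt.mpr (by exact_mod_cast this)
            simp [hc2]
          rw [hganow]
          simp [pvCore]
      · have hge : t.length ≤ i := by omega
        rw [PySem.List.pyRange_one_eq_nil (by exact_mod_cast hge)]
        rw [List.drop_eq_nil_of_le hge]
        rfl

lemma pv_main (t : List Char) (h0 : ∀ c, t.head? = some c → c ≠ '\n') :
    (PySem.List.pyRange 0 (t.length : Int)).flatMap (pvGA t) = pvCore none t := by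
  cases t with
  | nil => rfl
  | cons c rest =>
      have hpos : (0 : Int) < ((c :: rest).length : Int) := by
        have : 0 < (c :: rest).length := by simp
        exact_mod_cast this
      rw [PySem.List.pyRange_one_cons hpos, List.flatMap_cons]
      have hc : c ≠ '\n' := h0 c rfl
      have hg0 : pvGA (c :: rest) 0 = [c] := by
        simp only [pvGA]
        have h1 : PySem.List.pyGet? (c :: rest) 0 = some c := by
          have := PySem.List.pyGet?_natCast (c :: rest) 0
          simpa using this
        rw [h1]
        have hb : (some c == some '\n') = false := by
          simp [hc]
        rw [hb]
        simp
      rw [hg0]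
      have htail := pv_A_tail (c :: rest) (c :: rest).length 1 (by omega) (by omega)
      have h01 : ((0 : Int) + 1) = ((1 : Nat) : Int) := by norm_num
      rw [h01, htail]
      simp only [List.drop_one, List.tail_cons]
      have hidx : (c :: rest)[1-1]? = some c := by simp
      rw [hidx]
      cases rest with
      | nil => rfl
      | cons n t' =>
          show [c] ++ pvCore (some c) (n :: t') = pvCore none (c :: n :: t')
          rw [pvCore]
          simp

-- ===== B-side lemmas =====

lemma pv_splitOn_go (rest : List Char) :
    ∀ (fuel : Nat) (cur : List Char) (acc : List (List Char)), rest.length < fuel →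
      PySem.Chars.splitOn.go ['\n'] fuel rest cur acc
        = acc.reverse ++ pvSp cur.reverse rest := by
  induction rest with
  | nil =>
      intro fuel cur acc h
      match fuel with
      | f + 1 => simp [PySem.Chars.splitOn.go, pvSp]
  | cons c r ih =>
      intro fuel cur acc h
      match fuel with
      | f + 1 =>
        rw [PySem.Chars.splitOn.go]
        by_cases hc : c = '\n'
        · subst hc
          have hp : (['\n'].isPrefixOf ('\n' :: r)) = true := by simp [List.isPrefixOf]
          simp only [hp, if_true, List.length_singleton, List.drop_succ_cons, List.drop_zero]
          rw [ih f [] (cur.reverse :: acc) (by simpa using Nat.lt_of_succ_lt_succ h)]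
          simp [pvSp]
        · have hp : (['\n'].isPrefixOf (c :: r)) = false := by
            simp [List.isPrefixOf]; exact fun h' => hc h'.symm
          simp only [hp, Bool.false_eq_true, if_false]
          rw [ih f (c :: cur) acc (by simpa using Nat.lt_of_succ_lt_succ h)]
          simp [pvSp, hc]

lemma pv_splitOn_eq (s : List Char) : PySem.Chars.splitOn s ['\n'] = pvSp [] s := by
  rw [PySem.Chars.splitOn, pv_splitOn_go s (s.length + 1) [] [] (by omega)]
  simp

lemma pv_sp_nonnil (pre l : List Char) : pvSp pre l ≠ [] := by
  induction l generalizing pre with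
  | nil => simp [pvSp]
  | cons c r ih =>
      simp only [pvSp]
      split
      · simp
      · exact ih (pre ++ [c])

lemma pv_sp_nf (pre l : List Char) (hp : '\n' ∉ pre) :
    ∀ u ∈ pvSp pre l, '\n' ∉ u := by
  induction l generalizing pre with
  | nil => simpa [pvSp] using hp
  | cons c r ih =>
      simp only [pvSp]
      split
      · intro u hu
        rcases List.mem_cons.mp hu with h | h
        · subst h; exact hp
        · exact ih [] (by simp) u h
      · rename_i hc
        exact ih (pre ++ [c]) (by
          intro hmem
          rcases List.mem_append.mp hmem with h | h
          · exact hp h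
          · simp at h; exact hc h.symm)

lemma pv_sp_join (pre l : List Char) :
    (pvSp pre l).head?.getD [] ++ pvIcatPre (pvSp pre l).tail = pre ++ l := by
  induction l generalizing pre with
  | nil => simp [pvSp, pvIcatPre]
  | cons c r ih =>
      simp only [pvSp]
      split
      · rename_i hc
        subst hc
        rcases hs : pvSp ([] : List Char) r with _ | ⟨u, ps⟩
        · exact absurd hs (pv_sp_nonnil [] r)
        · have := ih ([] : List Char)
          rw [hs] at this
          simp only [List.head?_cons, Option.getD_some, List.tail_cons] at this
          simp [pvIcatPre, this]
      · rename_i hc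
        have := ih (pre ++ [c])
        simpa using this

lemma pv_getLast?_cons (a : Char) (l : List Char) (h : l ≠ []) :
    (a :: l).getLast? = l.getLast? := by
  cases l with
  | nil => exact absurd rfl h
  | cons b u => exact List.getLast?_cons_cons

lemma pv_core_append (u : List Char) (hnf : '\n' ∉ u) :
    ∀ (p : Option Char) (v : List Char),
      pvCore p (u ++ v) = u ++ pvCore (if u = [] then p else u.getLast?) v := by
  induction u with
  | nil => intro p v; simp
  | cons a u' ih =>
      intro p v
      have ha : a ≠ '\n' := by intro h; exact hnf (h ▸ List.mem_cons_self)
      have hnf' : '\n' ∉ u' := fun h => hnf (List.mem_cons_of_mem a h)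
      rcases huv : u' ++ v with _ | ⟨n, t⟩
      · have hu' : u' = [] := by cases u' <;> simp_all
        have hv : v = [] := by cases v <;> simp_all
        subst hu' hv
        simp [pvCore]
      · have hrec : pvCore p (a :: u' ++ v) = [a] ++ pvCore (some a) (u' ++ v) := by
          rw [show a :: u' ++ v = a :: (n :: t) from by rw [← huv]; rfl]
          rw [pvCore]
          have : (a == '\n') = false := by simp [ha]
          simp [this, ← huv]
        rw [show (a :: u') ++ v = a :: u' ++ v from rfl, hrec, ih hnf' (some a) v]
        rcases hu' : u' with _ | ⟨b, u''⟩
        · simp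
        · have h1 : (a :: u') ≠ [] := by simp
          have h2 : u' ≠ [] := by rw [hu']; simp
          rw [← hu']
          simp only [if_neg h1, if_neg h2]
          rw [pv_getLast?_cons a u' h2]
          simp

lemma pv_foldB_eq (ps : List (List Char)) :
    ∀ (res : List Char), (∀ u ∈ ps, '\n' ∉ u) →
      pvFoldB res ps = res ++ pvCore res.getLast? (pvIcatPre ps) := by
  induction ps with
  | nil => intro res h; simp [pvFoldB, pvIcatPre, pvCore]
  | cons u rest ih =>
      intro res h
      have hu : '\n' ∉ u := h u List.mem_cons_self
      have hrest : ∀ w ∈ rest, '\n' ∉ w := fun w hw => h w (List.mem_cons_of_mem u hw)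
      rw [pvFoldB]
      rcases htail : u ++ pvIcatPre rest with _ | ⟨n, t⟩
      · -- u = [] and rest = []
        have hu0 : u = [] := by cases u <;> simp_all
        have hrest0 : rest = [] := by
          cases rest with
          | nil => rfl
          | cons a r => rw [hu0] at htail; simp [pvIcatPre] at htail
        subst hu0; subst hrest0
        simp [pvFoldB, pvIcatPre, pvCore, pvGlueO]
      · have hglue_n : (('\n' : Char) == '\n'
              && (Option.map pvGlue.contains res.getLast?).getD false && pvGlue.contains n)
            = (pvGlueO res.getLast? && pvGlueO u.head?) := by
          rcases u with _ | ⟨b, u''⟩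
          · -- u = [], then n = '\n' (head of pvIcatPre rest, rest ≠ [])
            simp only [List.nil_append] at htail
            cases rest with
            | nil => simp [pvIcatPre] at htail
            | cons w r =>
                simp only [pvIcatPre] at htail
                have hn : n = '\n' := by injection htail with h1 _; exact h1.symm
                subst hn
                have h1 : pvGlueO ([] : List Char).head? = false := rfl
                have h2 : pvGlue.contains '\n' = false := by decide
                rw [h1, h2, Bool.and_false, Bool.and_false]
          · have hn : n = b := by
              have := htail
              simp only [List.cons_append] at this
              injection this with h1 _
              exact h1.symm
            subst hn
            simp only [List.head?_cons, pvGlueO, Option.map_some, Option.getD_some]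
            rw [show (('\n' : Char) == '\n') = true from rfl, Bool.true_and]

        rw [pvIcatPre, htail, pvCore, hglue_n]
        cases hcond : pvGlueO res.getLast? && pvGlueO u.head? with
        | true =>
            -- glued: u nonempty
            have hu_ne : u ≠ [] := by
              intro h0
              rw [h0] at hcond
              simp [pvGlueO] at hcond
            simp only [if_true]
            rw [ih (res ++ u) hrest]
            rw [show (n :: t) = u ++ pvIcatPre rest from htail.symm]
            rw [pv_core_append u hu (some '\n') (pvIcatPre rest)]
            rw [if_neg hu_ne]
            rw [List.getLast?_append_of_ne_nil res hu_ne]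
            simp [List.append_assoc]
        | false =>
            simp only [Bool.false_eq_true, if_false]
            rw [ih (res ++ '\n' :: u) hrest]
            rw [show (n :: t) = u ++ pvIcatPre rest from htail.symm]
            rw [pv_core_append u hu (some '\n') (pvIcatPre rest)]
            rcases u with _ | ⟨b, u''⟩
            · have : (res ++ '\n' :: ([] : List Char)).getLast? = some '\n' := by
                rw [List.getLast?_append_of_ne_nil res (by simp : ('\n' :: ([] : List Char)) ≠ [])]
                rfl
              rw [this]
              simp
            · have hu_ne : (b :: u'') ≠ [] := by simp
              rw [if_neg hu_ne]
              have : (res ++ '\n' :: (b :: u'')).getLast? = (b :: u'').getLast? := by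
                rw [List.getLast?_append_of_ne_nil res (by simp : ('\n' :: b :: u'') ≠ [])]
                exact pv_getLast?_cons '\n' (b :: u'') hu_ne
              rw [this]
              simp [List.append_assoc]

lemma pv_pyGet_neg_one {α : Type} (l : List α) : PySem.List.pyGet? l (-1) = l.getLast? := by
  cases l with
  | nil => rfl
  | cons a r =>
      simp only [PySem.List.pyGet?, PySem.List.pyIdx?]
      have h2 : -((a :: r).length : Int) ≤ -1 := by
        simp only [List.length_cons]; omega
      rw [if_pos h2]
      have h3 : (a :: r).length - (-(-1 : Int)).toNat = r.length := by simp
      rw [h3, List.getLast?_eq_getElem?]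
      simp

lemma pv_pyGet_zero {α : Type} (l : List α) : PySem.List.pyGet? l 0 = l.head? := by
  have h : (0 : Int) = ((0 : Nat) : Int) := rfl
  rw [h, PySem.List.pyGet?_natCast l 0]
  exact List.head?_eq_getElem?.symm

lemma pv_cond_B (res u : List Char) :
    (!res.isEmpty && !u.isEmpty
      && ((PySem.List.pyGet? res (-1)).map pvGlue.contains).getD false
      && ((PySem.List.pyGet? u 0).map pvGlue.contains).getD false)
    = (pvGlueO res.getLast? && pvGlueO u.head?) := by
  rw [pv_pyGet_neg_one, pv_pyGet_zero]
  cases res with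
  | nil => simp [pvGlueO]
  | cons a r =>
      cases u with
      | nil => simp [pvGlueO]
      | cons b w =>
          simp [pvGlueO]

lemma pv_foldl_eq (ps : List (List Char)) :
    ∀ (res : List Char),
      ps.foldl (fun res part =>
        if !res.isEmpty && !part.isEmpty
            && ((PySem.List.pyGet? res (-1)).map pvGlue.contains).getD false
            && ((PySem.List.pyGet? part 0).map pvGlue.contains).getD false
        then res ++ part
        else res ++ '\n' :: part) res
      = pvFoldB res ps := by
  induction ps with
  | nil => intro res; rfl
  | cons u rest ih =>
      intro res
      rw [List.foldl_cons, ih, pvFoldB, pv_cond_B]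

lemma pv_B_unfold (text : String) :
    removeBlank_alt text = String.mk (pvCore none (PySem.Chars.strip text.toList)) := by
  show String.mk _ = _
  rw [pv_splitOn_eq, PySem.List.slice_from_one, pv_pyGet_zero]
  rw [show ("abcdefghijklmnopqrstuvwxyzABCDEFGHIJKLMNOPQRSTUVWXYZ ,:;-_".toList) = pvGlue from rfl]
  rw [pv_foldl_eq]
  rcases hp : pvSp [] (PySem.Chars.strip text.toList) with _ | ⟨p0, ps⟩
  · exact absurd hp (pv_sp_nonnil _ _)
  · have hnf := pv_sp_nf [] (PySem.Chars.strip text.toList) (by simp)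
    rw [hp] at hnf
    have hnfps : ∀ u ∈ ps, '\n' ∉ u := fun u hu => hnf u (List.mem_cons_of_mem p0 hu)
    have hnfp0 : '\n' ∉ p0 := hnf p0 List.mem_cons_self
    simp only [List.head?_cons, Option.getD_some, List.tail_cons]
    rw [pv_foldB_eq ps p0 hnfps]
    have hjoin := pv_sp_join [] (PySem.Chars.strip text.toList)
    rw [hp] at hjoin
    simp only [List.head?_cons, Option.getD_some, List.tail_cons, List.nil_append] at hjoin
    rw [← hjoin, pv_core_append p0 hnfp0]
    congr 2
    cases p0 <;> simp

-- ===== VERDICT (by name: the statement is the Claim_ definition above) =====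
theorem removeBlank_spec : Claim_equal_removeBlank := by
  intro text _
  unfold Spec_removeBlank
  rw [pv_A_unfold, pv_B_unfold]
  congr 1
  rw [PySem.Chars.len_eq]
  apply pv_main
  intro c hcm hcontr
  have hfalse := pv_strip_head text.toList c hcm
  rw [hcontr] at hfalse
  exact absurd hfalse (by decide)
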